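-- pv_equiv track=rewrite | github.com/zefenghhh/OSN-NCS-private | function/utils.py | generate_square_coordinates2
-- ===== SOURCE A (Python) =====
-- def generate_square_coordinates2(canvas_size, square_size, pattern):
--     coordinates = []
--     y_offset = (canvas_size[1] - (len(pattern) * square_size)) // (len(pattern) + 1)
--     current_y = y_offset
--
--     for row in pattern:
--         x_offset = (canvas_size[0] - (row * square_size)) // (row + 1)
--         current_x = x_offset
--
--         for _ in range(row):
--             coordinates.append((current_x, current_y))
--             current_x += square_size + x_offset
--
--         current_y += square_size + y_offset
--
--     return coordinates
-- ===== SOURCE B (Python) =====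
-- def generate_square_coordinates2(canvas_size, square_size, pattern):
--     n = len(pattern)
--     y_off = (canvas_size[1] - n * square_size) // (n + 1)
--     # memo table: each distinct row value -> its full list of x coordinates,
--     # computed once even when the row value repeats in the pattern
--     xs = {}
--     for row in set(pattern):
--         x_off = (canvas_size[0] - row * square_size) // (row + 1)
--         xs[row] = [x_off + i * (square_size + x_off) for i in range(row)]
--     ys = [y_off + j * (square_size + y_off) for j in range(n)]
--     return [(x, y) for row, y in zip(pattern, ys) for x in xs[row]]
-- ===== Notes on version B (the rewrite author's own statement) =====
-- stated objective: alternative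
-- what changed: B stages the computation: it builds a memo dict mapping each distinct row value (set(pattern)) to its x-coordinate list computed once, precomputes the ys list, and assembles the result by zipping pattern with ys, replacing A's running current_x/current_y accumulator loops.
import Mathlib
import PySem

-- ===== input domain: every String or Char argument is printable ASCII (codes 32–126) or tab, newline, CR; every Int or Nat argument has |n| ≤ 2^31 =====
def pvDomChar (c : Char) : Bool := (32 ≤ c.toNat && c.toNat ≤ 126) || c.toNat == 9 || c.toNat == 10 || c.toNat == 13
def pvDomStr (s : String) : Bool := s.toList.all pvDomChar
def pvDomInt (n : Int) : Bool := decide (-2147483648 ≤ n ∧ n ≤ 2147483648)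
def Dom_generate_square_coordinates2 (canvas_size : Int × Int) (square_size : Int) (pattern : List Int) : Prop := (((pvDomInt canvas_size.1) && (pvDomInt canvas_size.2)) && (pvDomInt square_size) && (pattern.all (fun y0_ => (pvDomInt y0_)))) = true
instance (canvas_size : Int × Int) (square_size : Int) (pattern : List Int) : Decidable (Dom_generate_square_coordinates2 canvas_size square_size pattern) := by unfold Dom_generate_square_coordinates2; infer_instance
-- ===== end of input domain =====

-- B stages the computation: a memo dict maps each DISTINCT row value (set(pattern)) to its
-- x-coordinate list computed once, ys is precomputed, and the result is assembled by zip —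
-- no running accumulators (alternative decomposition, same asymptotic cost).

-- ===== PORT A =====
def generate_square_coordinates2 (canvas_size : Int × Int) (square_size : Int) (pattern : List Int) : List (Int × Int) :=
  let y_offset := PySem.Int.floordiv (canvas_size.2 - (pattern.length : Int) * square_size) ((pattern.length : Int) + 1)
  let st := pattern.foldl (fun (st : List (Int × Int) × Int) row =>
    let x_offset := PySem.Int.floordiv (canvas_size.1 - row * square_size) (row + 1)
    let inner := (PySem.List.pyRange 0 row 1).foldl
        (fun (st2 : List (Int × Int) × Int) _ => (st2.1 ++ [(st2.2, st.2)], st2.2 + (square_size + x_offset)))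
        (st.1, x_offset)
    (inner.1, st.2 + (square_size + y_offset))) ([], y_offset)
  st.1

-- ===== PORT B =====
-- xs[row] in Source B never raises KeyError (every row of pattern is a key of xs, which is built
-- over set(pattern)); ported as getD with default [] — exact on every input Python reaches.
def generate_square_coordinates2_alt (canvas_size : Int × Int) (square_size : Int) (pattern : List Int) : List (Int × Int) :=
  let n : Int := (pattern.length : Int)
  let y_off := PySem.Int.floordiv (canvas_size.2 - n * square_size) (n + 1)
  let xs : PySem.Dict Int (List Int) := (PySem.Set.ofList pattern).foldl
    (fun d row =>
      let x_off := PySem.Int.floordiv (canvas_size.1 - row * square_size) (row + 1)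
      d.insert row ((PySem.List.pyRange 0 row 1).map (fun i => x_off + i * (square_size + x_off))))
    PySem.Dict.empty
  let ys := (PySem.List.pyRange 0 n 1).map (fun j => y_off + j * (square_size + y_off))
  (pattern.zip ys).flatMap (fun ry => (xs.getD ry.1 []).map (fun x => (x, ry.2)))

-- ===== PRECONDITION & SPEC =====
-- Pre_ excludes patterns containing -1: there Python A raises ZeroDivisionError (row + 1 == 0).
def Pre_generate_square_coordinates2 (canvas_size : Int × Int) (square_size : Int) (pattern : List Int) : Prop :=
  ∀ r ∈ pattern, r + 1 ≠ 0
instance (canvas_size : Int × Int) (square_size : Int) (pattern : List Int) : Decidable (Pre_generate_square_coordinates2 canvas_size square_size pattern) := by unfold Pre_generate_square_coordinates2; infer_instance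

def pvWitness_generate_square_coordinates2 : (Int × Int) × Int × List Int := ((100, 100), 10, [2, 3])

def Spec_generate_square_coordinates2 (canvas_size : Int × Int) (square_size : Int) (pattern : List Int) (out : List (Int × Int)) : Prop := out = generate_square_coordinates2_alt canvas_size square_size pattern
instance (canvas_size : Int × Int) (square_size : Int) (pattern : List Int) (out : List (Int × Int)) : Decidable (Spec_generate_square_coordinates2 canvas_size square_size pattern out) := by unfold Spec_generate_square_coordinates2; infer_instance

-- ===== CLAIM (what is proved, stated in full; the proofs are below) =====
def Claim_equal_generate_square_coordinates2 : Prop := ∀ (canvas_size : Int × Int) (square_size : Int) (pattern : List Int), Dom_generate_square_coordinates2 canvas_size square_size pattern → Pre_generate_square_coordinates2 canvas_size square_size pattern → Spec_generate_square_coordinates2 canvas_size square_size pattern (generate_square_coordinates2 canvas_size square_size pattern)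

-- ===== LEMMAS AND PROOFS =====

-- Common closed form both ports are reduced to: rows keyed by enumerate index.
def pvCF (cs1 ss y : Int) (pat : List Int) (j : Int) : List (Int × Int) :=
  (PySem.List.enumerate pat j).flatMap (fun jr =>
    let x := PySem.Int.floordiv (cs1 - jr.2 * ss) (jr.2 + 1)
    (PySem.List.pyRange 0 jr.2 1).map
      (fun i => (x + i * (ss + x), y + jr.1 * (ss + y))))

-- A's inner loop, as a function of the start value cx: appends the closed-form row.
lemma pv_inner_fold (cy d : Int) :
    ∀ (l : List Int) (acc : List (Int × Int)) (cx : Int),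
      l.foldl (fun (st2 : List (Int × Int) × Int) (_ : Int) => (st2.1 ++ [(st2.2, cy)], st2.2 + d)) (acc, cx)
      = (acc ++ (List.range l.length).map (fun (i : Nat) => (cx + (i : Int) * d, cy)), cx + (l.length : Int) * d) := by
  intro l
  induction l with
  | nil => intro acc cx; simp
  | cons a l ih =>
    intro acc cx
    simp only [List.foldl_cons]
    rw [ih]
    refine Prod.ext ?_ ?_
    · show acc ++ [(cx, cy)] ++ _ = acc ++ _
      rw [List.append_assoc]
      congr 1
      rw [List.length_cons, List.range_succ_eq_map, List.map_cons, List.map_map]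
      simp only [Nat.cast_zero, zero_mul, add_zero, List.cons_append, List.nil_append]
      congr 1
      apply List.map_congr_left
      intro i _
      simp only [Function.comp]
      refine Prod.ext ?_ rfl
      push_cast
      ring
    · show cx + d + (l.length : Int) * d = cx + ((a :: l).length : Int) * d
      rw [List.length_cons]
      push_cast
      ring

-- A's outer loop with current_y = y + j*(ss+y) equals the closed form from j.
lemma pv_outer_fold (canvas_size : Int × Int) (ss y : Int) :
    ∀ (pat : List Int) (j : Int) (acc : List (Int × Int)),
      (pat.foldl (fun (st : List (Int × Int) × Int) row =>
          let x := PySem.Int.floordiv (canvas_size.1 - row * ss) (row + 1)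
          (((PySem.List.pyRange 0 row 1).foldl
              (fun (st2 : List (Int × Int) × Int) _ => (st2.1 ++ [(st2.2, st.2)], st2.2 + (ss + x)))
              (st.1, x)).1,
           st.2 + (ss + y)))
        (acc, y + j * (ss + y))).1
      = acc ++ pvCF canvas_size.1 ss y pat j := by
  intro pat
  induction pat with
  | nil => intro j acc; simp [pvCF, PySem.List.enumerate_nil]
  | cons a pat ih =>
    intro j acc
    unfold pvCF
    rw [PySem.List.enumerate_cons, List.flatMap_cons, List.foldl_cons]
    simp only
    rw [pv_inner_fold]
    have hy : (y + j * (ss + y)) + (ss + y) = y + (j + 1) * (ss + y) := by ring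
    rw [hy, ih (j + 1)]
    unfold pvCF
    rw [List.append_assoc]
    congr 2
    rw [PySem.List.pyRange_one, List.map_map, List.length_map, List.length_range]
    apply List.map_congr_left
    intro i _
    simp only [Function.comp]
    refine Prod.ext ?_ rfl
    push_cast
    ring

-- The memo-dict fold: final value at key r is g r for any r met in L.
lemma pv_dict_getD (g : Int → List Int) :
    ∀ (L : List Int) (d : PySem.Dict Int (List Int)) (r : Int),
      (L.foldl (fun d row => d.insert row (g row)) d).getD r []
      = if r ∈ L then g r else d.getD r [] := by
  intro L
  induction L with
  | nil => intro d r; simp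
  | cons a L ih =>
    intro d r
    rw [List.foldl_cons, ih]
    rw [PySem.Dict.getD_insert]
    by_cases h1 : r ∈ L <;> by_cases h2 : r = a <;>
      simp [List.mem_cons, h1, h2]

-- B's zip assembly equals the closed form, given the memo dict is correct on pat.
lemma pv_zip_fold (cs1 ss y : Int) (xs : PySem.Dict Int (List Int)) :
    ∀ (pat : List Int) (j : Int),
      (∀ r ∈ pat, xs.getD r []
        = (PySem.List.pyRange 0 r 1).map (fun i =>
            PySem.Int.floordiv (cs1 - r * ss) (r + 1)
            + i * (ss + PySem.Int.floordiv (cs1 - r * ss) (r + 1)))) →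
      (pat.zip ((List.range pat.length).map (fun (k : Nat) => y + (j + (k : Int)) * (ss + y)))).flatMap
          (fun ry => (xs.getD ry.1 []).map (fun x => (x, ry.2)))
      = pvCF cs1 ss y pat j := by
  intro pat
  induction pat with
  | nil => intro j _; simp [pvCF, PySem.List.enumerate_nil]
  | cons a pat ih =>
    intro j hmem
    rw [List.length_cons, List.range_succ_eq_map, List.map_cons, List.map_map]
    rw [List.zip_cons_cons, List.flatMap_cons]
    unfold pvCF
    rw [PySem.List.enumerate_cons, List.flatMap_cons]
    congr 1
    · rw [hmem a (List.mem_cons_self), List.map_map]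
      simp only [Nat.cast_zero, add_zero]
      rfl
    · have : (List.range pat.length).map ((fun (k : Nat) => y + (j + (k : Int)) * (ss + y)) ∘ Nat.succ)
           = (List.range pat.length).map (fun (k : Nat) => y + ((j + 1) + (k : Int)) * (ss + y)) := by
        apply List.map_congr_left
        intro k _
        simp only [Function.comp, Nat.succ_eq_add_one]
        push_cast
        ring
      rw [this, ih (j + 1) (fun r hr => hmem r (List.mem_cons_of_mem _ hr))]
      rfl

-- ===== VERDICT (by name: the statement is the Claim_ definition above) =====
theorem generate_square_coordinates2_spec : Claim_equal_generate_square_coordinates2 := by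
  intro canvas_size square_size pattern _ _
  unfold Spec_generate_square_coordinates2 generate_square_coordinates2 generate_square_coordinates2_alt
  simp only
  set y := PySem.Int.floordiv (canvas_size.2 - (pattern.length : Int) * square_size) ((pattern.length : Int) + 1) with hy
  -- A side
  have hA := pv_outer_fold canvas_size square_size y pattern 0 []
  simp only [zero_mul, add_zero, List.nil_append] at hA
  rw [hA]
  -- B side
  have hxs : ∀ r ∈ pattern,
      (((PySem.Set.ofList pattern).foldl
        (fun (d : PySem.Dict Int (List Int)) row =>
          d.insert row ((PySem.List.pyRange 0 row 1).map (fun i =>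
            PySem.Int.floordiv (canvas_size.1 - row * square_size) (row + 1)
            + i * (square_size + PySem.Int.floordiv (canvas_size.1 - row * square_size) (row + 1)))))
        PySem.Dict.empty).getD r [])
      = (PySem.List.pyRange 0 r 1).map (fun i =>
          PySem.Int.floordiv (canvas_size.1 - r * square_size) (r + 1)
          + i * (square_size + PySem.Int.floordiv (canvas_size.1 - r * square_size) (r + 1))) := by
    intro r hr
    rw [pv_dict_getD]
    rw [if_pos ((PySem.Set.mem_ofList _ _).mpr hr)]
  have hys : (PySem.List.pyRange 0 (pattern.length : Int) 1).map (fun j => y + j * (square_size + y))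
      = (List.range pattern.length).map (fun (k : Nat) => y + ((0 : Int) + (k : Int)) * (square_size + y)) := by
    rw [PySem.List.pyRange_one, List.map_map]
    simp only [sub_zero, Int.toNat_natCast]
    simp
  rw [hys, pv_zip_fold canvas_size.1 square_size y _ pattern 0 hxs]
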